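-- pv_equiv track=rewrite | github.com/Muyiyunzi/LeetCode | 473.py | makesquare
-- ===== SOURCE A (Python) =====
-- from typing import List
--
-- def makesquare(matchsticks: List[int]) -> bool:
--     totalLen = sum(matchsticks)
--     if totalLen % 4:
--         return False
--     tLen = totalLen // 4
--
--     dp = [-1] * (1 << len(matchsticks))
--     dp[0] = 0
--     for s in range(1, len(dp)):
--         for k, v in enumerate(matchsticks):
--             if s & (1 << k) == 0:
--                 continue
--             s1 = s & ~(1 << k)
--             if dp[s1] >= 0 and dp[s1] + v <= tLen:
--                 dp[s] = (dp[s1] + v) % tLen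
--                 break
--     return dp[-1] == 0
-- ===== SOURCE B (Python) =====
-- def makesquare(matchsticks):
--     total = sum(matchsticks)
--     if total % 4:
--         return False
--     t = total // 4
--     sticks = sorted(matchsticks, reverse=True)
--     n = len(sticks)
--
--     def dfs(i, a, b, c, d):
--         if i == n:
--             return True
--         v = sticks[i]
--         if a + v <= t and dfs(i + 1, a + v, b, c, d):
--             return True
--         if b + v <= t and dfs(i + 1, a, b + v, c, d):
--             return True
--         if c + v <= t and dfs(i + 1, a, b, c + v, d):
--             return True
--         return d + v <= t and dfs(i + 1, a, b, c, d + v)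
--
--     return dfs(0, 0, 0, 0, 0)
-- ===== Notes on version B (the rewrite author's own statement) =====
-- stated objective: alternative
-- what changed: A fills a bottom-up bitmask DP table over all 2^n subsets (dp[s] = remainder of the partially filled side); B is the classic depth-first backtracking that sorts the sticks in descending order and tries to place each stick into one of four side accumulators bounded by total/4. Pre_ excludes lists with negative sticks whose total is divisible by 4 (outside the natural domain; A's modular DP is accidental there) and nonempty zero-sum lists (A raises ZeroDivisionError).
-- outside the precondition, e.g. on makesquare([-4, -8]): A returns False, B returns True; on makesquare([0]): A raises ZeroDivisionError, B returns True
import Mathlib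
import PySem

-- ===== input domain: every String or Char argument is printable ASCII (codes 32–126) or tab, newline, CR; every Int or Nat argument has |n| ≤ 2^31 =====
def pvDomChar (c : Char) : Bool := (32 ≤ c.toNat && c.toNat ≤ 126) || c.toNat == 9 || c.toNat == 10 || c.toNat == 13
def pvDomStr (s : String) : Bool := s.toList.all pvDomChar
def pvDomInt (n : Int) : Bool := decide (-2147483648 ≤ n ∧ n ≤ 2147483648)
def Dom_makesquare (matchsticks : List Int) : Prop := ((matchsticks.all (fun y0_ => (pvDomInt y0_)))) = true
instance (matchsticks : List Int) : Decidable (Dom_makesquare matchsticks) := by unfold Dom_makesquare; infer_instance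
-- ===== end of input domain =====

-- B replaces A's bottom-up bitmask DP over all 2^n subsets by the classic 4-bucket
-- backtracking over the sticks sorted in descending order (objective: alternative algorithm).

-- ===== PORT A =====
-- inner 'for k, v in enumerate(matchsticks): … continue … break' loop of A:
-- returns the value written to dp[s] by the first k that breaks, none if the loop falls through.
def aFind (tLen : Int) (dp : List Int) (s : Int) : List (Int × Int) → Option Int
  | [] => none
  | (k, v) :: rest =>
    -- k comes from enumerate, so k ≥ 0 and '1 << k' is exactly (1 : Int) <<< k.toNat
    if PySem.Int.band s ((1 : Int) <<< k.toNat) == 0 then aFind tLen dp s rest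
    else
      let s1 := PySem.Int.band s (Int.not ((1 : Int) <<< k.toNat))
      let d1 := PySem.List.pyGetD dp s1 (-1)   -- dp[s1]: 0 ≤ s1 ≤ s < len(dp) always here
      if d1 ≥ 0 ∧ d1 + v ≤ tLen then some (PySem.Int.mod (d1 + v) tLen)
      else aFind tLen dp s rest

def makesquare (matchsticks : List Int) : Bool :=
  let totalLen := matchsticks.sum
  if PySem.Int.mod totalLen 4 ≠ 0 then false
  else
    let tLen := PySem.Int.floordiv totalLen 4
    let dp0 := PySem.List.pySetD (PySem.List.pyRepeat [(-1 : Int)] ((1 : Int) <<< matchsticks.length)) 0 0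
    let dp :=
      (PySem.List.pyRange 1 (PySem.List.len dp0)).foldl
        (fun dp s =>
          match aFind tLen dp s (PySem.List.enumerate matchsticks) with
          | some w => PySem.List.pySetD dp s w
          | none => dp) dp0
    PySem.List.pyGetD dp (-1) 0 == 0

-- ===== PORT B =====
-- Source B's dfs(i, a, b, c, d): structural recursion over the (sorted) stick list suffix.
def bDfs (t : Int) : List Int → Int → Int → Int → Int → Bool
  | [], _, _, _, _ => true
  | v :: rest, a, b, c, d =>
    (decide (a + v ≤ t) && bDfs t rest (a + v) b c d) ||
    (decide (b + v ≤ t) && bDfs t rest a (b + v) c d) ||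
    (decide (c + v ≤ t) && bDfs t rest a b (c + v) d) ||
    (decide (d + v ≤ t) && bDfs t rest a b c (d + v))

def makesquare_alt (matchsticks : List Int) : Bool :=
  let total := matchsticks.sum
  if PySem.Int.mod total 4 ≠ 0 then false
  else
    bDfs (PySem.Int.floordiv total 4)
      (PySem.List.sorted matchsticks (fun x => x) true) 0 0 0 0

-- ===== PRECONDITION & SPEC =====
-- Pre_ admits the problem's natural domain of nonnegative stick lengths (minus nonempty
-- zero-sum lists, on which A raises ZeroDivisionError at 'dp[s1] % tLen' with tLen = 0),
-- plus every list whose total is not divisible by 4 (both programs return False at once).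
-- Lists with negative sticks whose total is divisible by 4 are excluded: negative "lengths"
-- are outside the task's meaning and A's modular DP behaviour there is accidental.
def Pre_makesquare (matchsticks : List Int) : Prop :=
  ((∀ x ∈ matchsticks, 0 ≤ x) ∧ (matchsticks = [] ∨ matchsticks.sum ≠ 0)) ∨
    PySem.Int.mod matchsticks.sum 4 ≠ 0
instance (matchsticks : List Int) : Decidable (Pre_makesquare matchsticks) := by
  unfold Pre_makesquare; infer_instance

def pvWitness_makesquare : List Int := [1, 1, 1, 1]

def Spec_makesquare (matchsticks : List Int) (out : Bool) : Prop := out = makesquare_alt matchsticks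
instance (matchsticks : List Int) (out : Bool) : Decidable (Spec_makesquare matchsticks out) := by unfold Spec_makesquare; infer_instance

-- ===== CLAIM (what is proved, stated in full; the proofs are below) =====
def Claim_equal_makesquare : Prop := ∀ (matchsticks : List Int), Dom_makesquare matchsticks → Pre_makesquare matchsticks → Spec_makesquare matchsticks (makesquare matchsticks)


-- ===== LEMMAS AND PROOFS =====

-- ---- proof-side model of A's dp table ----

-- the sub-list of l selected by the bit mask m (bit 0 = head)
def sel : List Int → Nat → List Int
  | [], _ => []
  | v :: L, m => (if m % 2 = 1 then [v] else []) ++ sel L (m / 2)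

-- first-k search of A's inner loop, over bit indices, reading smaller masks through g
def dpFind (l : List Int) (t : Int) (g : Nat → Int) (m : Nat) : List Nat → Option Int
  | [] => none
  | k :: ks =>
    if m.testBit k then
      let r := g (m - 2 ^ k)
      if 0 ≤ r ∧ r + l.getD k 0 ≤ t then some (PySem.Int.mod (r + l.getD k 0) t)
      else dpFind l t g m ks
    else dpFind l t g m ks

def dpGo (l : List Int) (t : Int) : Nat → Nat → Int
  | 0, _ => -1
  | fuel + 1, m =>
    if m = 0 then 0 else
      match dpFind l t (dpGo l t fuel) m (List.range l.length) with
      | some w => w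
      | none => -1

def dpF (l : List Int) (t : Int) (m : Nat) : Int := dpGo l t (m + 1) m

-- ---- proof-side model of B's search: distributions of a list over 4 buckets ----

inductive Distr4 : List Int → (Fin 4 → Int) → Prop
  | nil : Distr4 [] (fun _ => 0)
  | cons (v : Int) (L : List Int) (f : Fin 4 → Int) (j : Fin 4) :
      Distr4 L f → Distr4 (v :: L) (Function.update f j (f j + v))

-- shape of the bucket sums reachable by A's one-partial-side filling
def Shape (t s : Int) (f : Fin 4 → Int) : Prop :=
  ∃ j, (∀ i, i ≠ j → f i = t ∨ f i = 0) ∧ (f j = s % t ∨ (s % t = 0 ∧ f j = t))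

-- ---- basic lemmas ----

theorem dpFind_congr (l : List Int) (t : Int) (g1 g2 : Nat → Int) (m : Nat) (ks : List Nat)
    (h : ∀ k ∈ ks, m.testBit k → g1 (m - 2 ^ k) = g2 (m - 2 ^ k)) :
    dpFind l t g1 m ks = dpFind l t g2 m ks := by
  induction ks with
  | nil => rfl
  | cons k ks ih =>
    simp only [dpFind]
    by_cases hb : m.testBit k
    · simp only [hb, if_true]
      rw [h k (by simp) hb]
      split
      · rfl
      · exact ih (fun k' hk' hb' => h k' (by simp [hk']) hb')
    · simp only [hb, Bool.false_eq_true, if_false]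
      exact ih (fun k' hk' hb' => h k' (by simp [hk']) hb')

theorem dpGo_mono (l : List Int) (t : Int) : ∀ (m f1 f2 : Nat), m < f1 → m < f2 →
    dpGo l t f1 m = dpGo l t f2 m := by
  intro m
  induction m using Nat.strong_induction_on with
  | _ m IH =>
    intro f1 f2 h1 h2
    obtain ⟨g1, rfl⟩ : ∃ g, f1 = g + 1 := ⟨f1 - 1, by omega⟩
    obtain ⟨g2, rfl⟩ : ∃ g, f2 = g + 1 := ⟨f2 - 1, by omega⟩
    simp only [dpGo]
    by_cases hm : m = 0
    · simp [hm]
    · simp only [hm, if_false]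
      have : dpFind l t (dpGo l t g1) m (List.range l.length)
           = dpFind l t (dpGo l t g2) m (List.range l.length) := by
        apply dpFind_congr
        intro k _ hb
        have hk2 : 2 ^ k ≤ m := Nat.ge_two_pow_of_testBit hb
        have hpos : 0 < 2 ^ k := Nat.two_pow_pos k
        exact IH (m - 2 ^ k) (by omega) g1 g2 (by omega) (by omega)
      rw [this]

theorem dpF_unfold (l : List Int) (t : Int) (m : Nat) :
    dpF l t m = if m = 0 then 0 else
      match dpFind l t (dpF l t) m (List.range l.length) with
      | some w => w
      | none => -1 := by
  simp only [dpF, dpGo]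
  by_cases hm : m = 0
  · simp [hm]
  · simp only [hm, if_false]
    have : dpFind l t (dpGo l t m) m (List.range l.length)
         = dpFind l t (dpF l t) m (List.range l.length) := by
      apply dpFind_congr
      intro k _ hb
      have hk2 : 2 ^ k ≤ m := Nat.ge_two_pow_of_testBit hb
      have hpos : 0 < 2 ^ k := Nat.two_pow_pos k
      exact dpGo_mono l t (m - 2 ^ k) m ((m - 2 ^ k) + 1) (by omega) (by omega)
    rw [this]

theorem sel_zero (L : List Int) : sel L 0 = [] := by
  induction L with
  | nil => rfl
  | cons v L ih => simp [sel, ih]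

theorem sel_full (L : List Int) : sel L (2 ^ L.length - 1) = L := by
  induction L with
  | nil => rfl
  | cons v L ih =>
    have hp : 0 < 2 ^ L.length := Nat.two_pow_pos _
    have hps : 2 ^ (L.length + 1) = 2 ^ L.length * 2 := pow_succ 2 L.length
    have h1 : (2 ^ (L.length + 1) - 1) % 2 = 1 := by omega
    have h2 : (2 ^ (L.length + 1) - 1) / 2 = 2 ^ L.length - 1 := by omega
    show sel (v :: L) (2 ^ (L.length + 1) - 1) = v :: L
    simp [sel, h1, h2, ih]

theorem sel_sublist (L : List Int) (m : Nat) : (sel L m).Sublist L := by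
  induction L generalizing m with
  | nil => simp [sel]
  | cons v L ih =>
    simp only [sel]
    by_cases h : m % 2 = 1
    · simp only [h, if_true]
      exact (ih (m / 2)).cons₂ v
    · simp only [h, if_false]
      exact (ih (m / 2)).cons v

theorem sel_remove (L : List Int) : ∀ (m k : Nat), m.testBit k → k < L.length →
    ∃ L₁ L₂, sel L m = L₁ ++ L.getD k 0 :: L₂ ∧ sel L (m - 2 ^ k) = L₁ ++ L₂ := by
  induction L with
  | nil => intro m k _ hk; simp at hk
  | cons v L ih =>
    intro m k hb hk
    cases k with
    | zero =>
      have h1 : m % 2 = 1 := by simpa [Nat.testBit_zero] using hb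
      refine ⟨[], sel L (m / 2), ?_, ?_⟩
      · simp [sel, h1]
      · have h2 : (m - 1) % 2 = 0 := by omega
        have h3 : (m - 1) / 2 = m / 2 := by omega
        simp [sel, h2, h3]
    | succ k =>
      have hb' : (m / 2).testBit k := by rwa [Nat.testBit_add_one] at hb
      have hk' : k < L.length := by simpa using hk
      obtain ⟨L₁, L₂, e1, e2⟩ := ih (m / 2) k hb' hk'
      have hq : 2 ^ k ≤ m / 2 := Nat.ge_two_pow_of_testBit hb'
      have hmod : (m - 2 ^ (k + 1)) % 2 = m % 2 := by
        have : 2 ^ (k + 1) = 2 * 2 ^ k := by ring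
        omega
      have hdiv : (m - 2 ^ (k + 1)) / 2 = m / 2 - 2 ^ k := by
        have : 2 ^ (k + 1) = 2 * 2 ^ k := by ring
        omega
      by_cases h : m % 2 = 1
      · exact ⟨v :: L₁, L₂, by simp [sel, h, e1], by simp [sel, hmod, h, hdiv, e2]⟩
      · exact ⟨L₁, L₂, by simp [sel, h, e1], by simp [sel, hmod, h, hdiv, e2]⟩

theorem sel_pos (L : List Int) : ∀ (m : Nat) (L₁ L₂ : List Int) (v : Int),
    sel L m = L₁ ++ v :: L₂ →
    ∃ k, k < L.length ∧ m.testBit k ∧ L.getD k 0 = v ∧ sel L (m - 2 ^ k) = L₁ ++ L₂ := by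
  induction L with
  | nil => intro m L₁ L₂ v h; simp [sel] at h
  | cons w L ih =>
    intro m L₁ L₂ v h
    by_cases hp : m % 2 = 1
    · simp only [sel, hp, if_true, List.singleton_append] at h
      cases L₁ with
      | nil =>
        simp only [List.nil_append] at h
        obtain ⟨rfl, hrest⟩ : w = v ∧ sel L (m / 2) = L₂ := by
          constructor
          · exact (List.cons_eq_cons.mp h).1
          · exact (List.cons_eq_cons.mp h).2
        refine ⟨0, by simp, by simp [Nat.testBit_zero, hp], by simp, ?_⟩
        have h2 : (m - 1) % 2 = 0 := by omega
        have h3 : (m - 1) / 2 = m / 2 := by omega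
        simp [sel, h2, h3, hrest]
      | cons w' L₁' =>
        simp only [List.cons_append, List.cons_eq_cons] at h
        obtain ⟨rfl, h⟩ := h
        obtain ⟨k, hk, hb, hv, he⟩ := ih (m / 2) L₁' L₂ v h
        have hq : 2 ^ k ≤ m / 2 := Nat.ge_two_pow_of_testBit hb
        have hmod : (m - 2 ^ (k + 1)) % 2 = m % 2 := by
          have : 2 ^ (k + 1) = 2 * 2 ^ k := by ring
          omega
        have hdiv : (m - 2 ^ (k + 1)) / 2 = m / 2 - 2 ^ k := by
          have : 2 ^ (k + 1) = 2 * 2 ^ k := by ring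
          omega
        refine ⟨k + 1, by simpa using hk, by rwa [Nat.testBit_add_one], by simpa using hv, ?_⟩
        simp [sel, hmod, hp, hdiv, he]
    · simp only [sel, hp, if_false, List.nil_append] at h
      obtain ⟨k, hk, hb, hv, he⟩ := ih (m / 2) L₁ L₂ v h
      have hq : 2 ^ k ≤ m / 2 := Nat.ge_two_pow_of_testBit hb
      have hmod : (m - 2 ^ (k + 1)) % 2 = m % 2 := by
        have : 2 ^ (k + 1) = 2 * 2 ^ k := by ring
        omega
      have hdiv : (m - 2 ^ (k + 1)) / 2 = m / 2 - 2 ^ k := by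
        have : 2 ^ (k + 1) = 2 * 2 ^ k := by ring
        omega
      refine ⟨k + 1, by simpa using hk, by rwa [Nat.testBit_add_one], by simpa using hv, ?_⟩
      simp [sel, hmod, hp, hdiv, he]

theorem sel_ne_nil (L : List Int) (m : Nat) (h0 : m ≠ 0) (hlt : m < 2 ^ L.length) :
    sel L m ≠ [] := by
  obtain ⟨k, hb⟩ := Nat.exists_testBit_of_ne_zero h0
  have hk : k < L.length := by
    by_contra hge
    have h1 : 2 ^ L.length ≤ 2 ^ k := Nat.pow_le_pow_right (by omega) (by omega)
    have h2 : 2 ^ k ≤ m := Nat.ge_two_pow_of_testBit hb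
    omega
  obtain ⟨L₁, L₂, e1, _⟩ := sel_remove L m k hb hk
  simp [e1]


theorem dpFind_eq_some (l : List Int) (t : Int) (g : Nat → Int) (m : Nat) (w : Int) :
    ∀ ks : List Nat, dpFind l t g m ks = some w →
    ∃ k ∈ ks, m.testBit k ∧ 0 ≤ g (m - 2 ^ k) ∧ g (m - 2 ^ k) + l.getD k 0 ≤ t ∧
      w = PySem.Int.mod (g (m - 2 ^ k) + l.getD k 0) t := by
  intro ks
  induction ks with
  | nil => intro h; simp [dpFind] at h
  | cons k ks ih =>
    intro h
    simp only [dpFind] at h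
    by_cases hb : m.testBit k
    · simp only [hb, if_true] at h
      by_cases hc : 0 ≤ g (m - 2 ^ k) ∧ g (m - 2 ^ k) + l.getD k 0 ≤ t
      · rw [if_pos hc] at h
        exact ⟨k, by simp, hb, hc.1, hc.2, (Option.some.injEq _ _ ▸ h).symm⟩
      · rw [if_neg hc] at h
        obtain ⟨k', hk', rest⟩ := ih h
        exact ⟨k', by simp [hk'], rest⟩
    · simp only [hb, Bool.false_eq_true, if_false] at h
      obtain ⟨k', hk', rest⟩ := ih h
      exact ⟨k', by simp [hk'], rest⟩

theorem dpFind_eq_none_iff (l : List Int) (t : Int) (g : Nat → Int) (m : Nat) :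
    ∀ ks : List Nat, (dpFind l t g m ks = none ↔
      ∀ k ∈ ks, m.testBit k → ¬(0 ≤ g (m - 2 ^ k) ∧ g (m - 2 ^ k) + l.getD k 0 ≤ t)) := by
  intro ks
  induction ks with
  | nil => simp [dpFind]
  | cons k ks ih =>
    simp only [dpFind]
    by_cases hb : m.testBit k
    · simp only [hb, if_true]
      by_cases hc : 0 ≤ g (m - 2 ^ k) ∧ g (m - 2 ^ k) + l.getD k 0 ≤ t
      · rw [if_pos hc]
        constructor
        · intro h; exact absurd h (by simp)
        · intro h; exact absurd hc (h k (by simp) hb)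
      · rw [if_neg hc]
        rw [ih]
        constructor
        · intro h k' hk' hb'
          rcases List.mem_cons.mp hk' with rfl | hk'
          · exact hc
          · exact h k' hk' hb'
        · intro h k' hk' hb'
          exact h k' (by simp [hk']) hb'
    · simp only [hb, Bool.false_eq_true, if_false]
      rw [ih]
      constructor
      · intro h k' hk' hb'
        rcases List.mem_cons.mp hk' with rfl | hk'
        · exact absurd hb' hb
        · exact h k' hk' hb'
      · intro h k' hk' hb'
        exact h k' (by simp [hk']) hb'

theorem sel_sum_remove (l : List Int) (m k : Nat) (hb : m.testBit k) (hk : k < l.length) :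
    (sel l m).sum = (sel l (m - 2 ^ k)).sum + l.getD k 0 := by
  obtain ⟨L₁, L₂, e1, e2⟩ := sel_remove l m k hb hk
  rw [e1, e2]
  simp [List.sum_append]
  ring

-- ---- dp characterization ----

theorem dpF_neg_or (l : List Int) (t : Int) (ht : 0 < t) : ∀ m : Nat,
    dpF l t m = -1 ∨ dpF l t m = (sel l m).sum % t := by
  intro m
  induction m using Nat.strong_induction_on with
  | _ m IH =>
    rw [dpF_unfold]
    by_cases hm : m = 0
    · subst hm
      right
      simp [sel_zero]
    · simp only [hm, if_false]
      cases hF : dpFind l t (dpF l t) m (List.range l.length) with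
      | none => left; rfl
      | some w =>
        right
        obtain ⟨k, hkmem, hb, hge, hle, hw⟩ := dpFind_eq_some l t (dpF l t) m w _ hF
        have hk : k < l.length := List.mem_range.mp hkmem
        have hlt : m - 2 ^ k < m := by
          have h1 : 2 ^ k ≤ m := Nat.ge_two_pow_of_testBit hb
          have h2 : 0 < 2 ^ k := Nat.two_pow_pos k
          omega
        have hval : dpF l t (m - 2 ^ k) = (sel l (m - 2 ^ k)).sum % t := by
          rcases IH _ hlt with h | h
          · rw [h] at hge; omega
          · exact h
        rw [hw, hval, PySem.Int.mod_eq_emod_of_pos ht, Int.emod_add_emod,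
          ← sel_sum_remove l m k hb hk]

theorem dpF_nonneg_iff (l : List Int) (t : Int) (ht : 0 < t) (m : Nat) :
    0 ≤ dpF l t m ↔ (m = 0 ∨ ∃ k, k < l.length ∧ m.testBit k ∧
      0 ≤ dpF l t (m - 2 ^ k) ∧ (sel l (m - 2 ^ k)).sum % t + l.getD k 0 ≤ t) := by
  by_cases hm : m = 0
  · subst hm
    have hv : dpF l t 0 = 0 := by rw [dpF_unfold]; simp
    rw [hv]
    simp
  · cases hF : dpFind l t (dpF l t) m (List.range l.length) with
    | none =>
      have hv : dpF l t m = -1 := by rw [dpF_unfold]; simp [hm, hF]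
      rw [dpFind_eq_none_iff] at hF
      rw [hv]
      constructor
      · intro h; omega
      · rintro (rfl | ⟨k, hk, hb, hge, hle⟩)
        · exact absurd rfl hm
        · exfalso
          have hval : dpF l t (m - 2 ^ k) = (sel l (m - 2 ^ k)).sum % t := by
            rcases dpF_neg_or l t ht (m - 2 ^ k) with h | h
            · rw [h] at hge; omega
            · exact h
          exact hF k (List.mem_range.mpr hk) hb ⟨hge, by rw [hval]; exact hle⟩
    | some w =>
      have hv : dpF l t m = w := by rw [dpF_unfold]; simp [hm, hF]
      obtain ⟨k, hkmem, hb, hge, hle, hw⟩ := dpFind_eq_some l t (dpF l t) m w _ hF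
      have hval : dpF l t (m - 2 ^ k) = (sel l (m - 2 ^ k)).sum % t := by
        rcases dpF_neg_or l t ht (m - 2 ^ k) with h | h
        · rw [h] at hge; omega
        · exact h
      rw [hv]
      constructor
      · intro _
        exact Or.inr ⟨k, List.mem_range.mp hkmem, hb, hge, by rw [← hval]; exact hle⟩
      · intro _
        rw [hw, PySem.Int.mod_eq_emod_of_pos ht]
        exact Int.emod_nonneg _ (by omega)


-- ---- Distr4 lemmas ----

theorem upd_comm (f : Fin 4 → Int) (j₁ j₂ : Fin 4) (v w : Int) :
    Function.update (Function.update f j₂ (f j₂ + w)) j₁ ((Function.update f j₂ (f j₂ + w)) j₁ + v)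
    = Function.update (Function.update f j₁ (f j₁ + v)) j₂ ((Function.update f j₁ (f j₁ + v)) j₂ + w) := by
  funext i
  by_cases h12 : j₁ = j₂
  · subst h12
    by_cases hi : i = j₁
    · subst hi; simp [Function.update]; ring
    · simp [Function.update, hi]
  · by_cases hi1 : i = j₁
    · subst hi1
      simp [Function.update, h12, Ne.symm h12]
    · by_cases hi2 : i = j₂
      · subst hi2
        simp [Function.update, h12, Ne.symm h12, hi1]
      · simp [Function.update, hi1, hi2]

theorem distr4_nonneg {L : List Int} {f : Fin 4 → Int} (h : Distr4 L f) :
    (∀ x ∈ L, 0 ≤ x) → ∀ j, 0 ≤ f j := by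
  induction h with
  | nil => intro _ j; exact le_refl 0
  | cons v L f j hd ih =>
    intro hL i
    have hv : 0 ≤ v := hL v (by simp)
    have hrest := ih (fun x hx => hL x (by simp [hx]))
    by_cases hij : i = j
    · subst hij
      have := hrest i
      simp only [Function.update_self]
      omega
    · simp [Function.update, hij, hrest i]

theorem distr4_sum {L : List Int} {f : Fin 4 → Int} (h : Distr4 L f) :
    f 0 + f 1 + f 2 + f 3 = L.sum := by
  induction h with
  | nil => simp
  | cons v L f j hd ih =>
    fin_cases j <;> simp [Function.update, List.sum_cons] <;> omega

theorem distr4_perm {L L' : List Int} (hp : L.Perm L') :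
    ∀ {f : Fin 4 → Int}, Distr4 L f → Distr4 L' f := by
  induction hp with
  | nil => intro f h; exact h
  | cons x hp ih =>
    intro f h
    cases h with
    | cons v L f' j hd => exact Distr4.cons _ _ _ _ (ih hd)
  | swap x y l =>
    intro f h
    cases h with
    | cons v1 L1 f1 j1 hd1 =>
      cases hd1 with
      | cons v2 L2 f2 j2 hd2 =>
        have h1 : Distr4 (y :: l) (Function.update f2 j1 (f2 j1 + y)) := Distr4.cons _ _ _ _ hd2
        have h2 := Distr4.cons x _ _ j2 h1
        rwa [upd_comm f2 j2 j1 x y] at h2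
  | trans h1 h2 ih1 ih2 =>
    intro f h
    exact ih2 (ih1 h)

theorem distr4_insert (L₁ L₂ : List Int) (j : Fin 4) (v : Int) :
    ∀ f : Fin 4 → Int, Distr4 (L₁ ++ L₂) f →
      Distr4 (L₁ ++ v :: L₂) (Function.update f j (f j + v)) := by
  induction L₁ with
  | nil => intro f h; exact Distr4.cons v L₂ f j h
  | cons a L₁ ih =>
    intro f h
    cases h with
    | cons _ _ f' j' hd =>
      have h2 := Distr4.cons a _ _ j' (ih f' hd)
      rwa [upd_comm f' j' j a v] at h2

theorem distr4_extract {L : List Int} {f : Fin 4 → Int} (h : Distr4 L f) (j : Fin 4) :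
    f j ≠ 0 → ∃ L₁ v L₂ f', L = L₁ ++ v :: L₂ ∧ Distr4 (L₁ ++ L₂) f' ∧
      f = Function.update f' j (f' j + v) := by
  induction h with
  | nil => intro hj; exact absurd rfl hj
  | cons v L f j' hd ih =>
    intro hj
    by_cases hjj : j' = j
    · subst hjj
      exact ⟨[], v, L, f, rfl, hd, rfl⟩
    · have hfj : f j ≠ 0 := by
        have he : Function.update f j' (f j' + v) j = f j := Function.update_of_ne (Ne.symm hjj) _ _
        simpa [he] using hj
      obtain ⟨L₁, v₀, L₂, f₂, rfl, hD, hf⟩ := ih hfj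
      refine ⟨v :: L₁, v₀, L₂, Function.update f₂ j' (f₂ j' + v), rfl,
        Distr4.cons _ _ _ _ hD, ?_⟩
      subst hf
      exact upd_comm f₂ j' j v v₀

-- ---- the two directions between A's dp and 4-bucket distributions ----

theorem fill_to_shape (l : List Int) (t : Int) (ht : 0 < t) (hnn : ∀ x ∈ l, 0 ≤ x)
    (hsum : l.sum ≤ 4 * t) : ∀ m : Nat, 0 ≤ dpF l t m →
    ∃ f, Distr4 (sel l m) f ∧ Shape t (sel l m).sum f := by
  intro m
  induction m using Nat.strong_induction_on with
  | _ m IH =>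
    intro hdp
    rcases (dpF_nonneg_iff l t ht m).mp hdp with rfl | ⟨k, hk, hb, hge, hle⟩
    · refine ⟨fun _ => 0, by rw [sel_zero]; exact Distr4.nil, 0, fun i _ => Or.inr rfl, ?_⟩
      left; rw [sel_zero]; simp
    · have h2k : 2 ^ k ≤ m := Nat.ge_two_pow_of_testBit hb
      have h2kp : 0 < 2 ^ k := Nat.two_pow_pos k
      obtain ⟨f, hD, j', hoth, hj'⟩ := IH (m - 2 ^ k) (by omega) hge
      obtain ⟨L₁, L₂, e1, e2⟩ := sel_remove l m k hb hk
      have hv0 : 0 ≤ l.getD k 0 := by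
        rw [List.getD_eq_getElem l 0 hk]
        exact hnn _ (List.getElem_mem hk)
      have hsum : (sel l m).sum = (sel l (m - 2 ^ k)).sum + l.getD k 0 :=
        sel_sum_remove l m k hb hk
      have hr'0 : 0 ≤ (sel l (m - 2 ^ k)).sum % t := Int.emod_nonneg _ (by omega)
      have hr't : (sel l (m - 2 ^ k)).sum % t < t := Int.emod_lt_of_pos _ ht
      have hrm : (sel l m).sum % t = ((sel l (m - 2 ^ k)).sum % t + l.getD k 0) % t := by
        rw [hsum, Int.emod_add_emod]
      have hDm : ∀ (i : Fin 4) (g : Fin 4 → Int), Distr4 (sel l (m - 2 ^ k)) g →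
          Distr4 (sel l m) (Function.update g i (g i + l.getD k 0)) := by
        intro i g hg
        rw [e1]
        exact distr4_insert L₁ L₂ i (l.getD k 0) g (by rw [← e2]; exact hg)
      rcases hj' with hj1 | ⟨hr0, hjt⟩
      · refine ⟨Function.update f j' (f j' + l.getD k 0), hDm j' f hD, j', ?_, ?_⟩
        · intro i hi
          rw [Function.update_of_ne hi]
          exact hoth i hi
        · by_cases hc : (sel l (m - 2 ^ k)).sum % t + l.getD k 0 = t
          · right
            refine ⟨by rw [hrm, hc]; simp, ?_⟩
            rw [Function.update_self, hj1, hc]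
          · left
            have he : ((sel l (m - 2 ^ k)).sum % t + l.getD k 0) % t
                = (sel l (m - 2 ^ k)).sum % t + l.getD k 0 :=
              Int.emod_eq_of_lt (by omega) (by omega)
            rw [hrm, he, Function.update_self, hj1]
      · have hvt : l.getD k 0 ≤ t := by omega
        by_cases hzero : ∃ i, f i = 0
        · obtain ⟨i₀, hi₀⟩ := hzero
          refine ⟨Function.update f i₀ (f i₀ + l.getD k 0), hDm i₀ f hD, i₀, ?_, ?_⟩
          · intro i hi
            rw [Function.update_of_ne hi]
            by_cases hij' : i = j'
            · subst hij'; left; exact hjt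
            · exact hoth i hij'
          · have hrv : (sel l m).sum % t = l.getD k 0 % t := by
              rw [hrm, hr0, zero_add]
            by_cases hc : l.getD k 0 = t
            · right
              refine ⟨by rw [hrv, hc]; simp, ?_⟩
              rw [Function.update_self, hi₀, hc, zero_add]
            · left
              rw [hrv, Int.emod_eq_of_lt hv0 (by omega), Function.update_self, hi₀, zero_add]
        · push_neg at hzero
          have hallt : ∀ i, f i = t := by
            intro i
            by_cases hij' : i = j'
            · subst hij'; exact hjt
            · rcases hoth i hij' with h | h
              · exact h
              · exact absurd h (hzero i)
          have hsum4 : (sel l (m - 2 ^ k)).sum = 4 * t := by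
            have hs := distr4_sum hD
            rw [hallt 0, hallt 1, hallt 2, hallt 3] at hs
            omega
          have hle4 : (sel l m).sum ≤ l.sum := List.Sublist.sum_le_sum (sel_sublist l m) hnn
          have hvz : l.getD k 0 = 0 := by omega
          refine ⟨Function.update f j' (f j' + l.getD k 0), hDm j' f hD, j', ?_, ?_⟩
          · intro i hi
            rw [Function.update_of_ne hi]
            exact hoth i hi
          · right
            refine ⟨by rw [hrm, hr0, hvz]; simp, ?_⟩
            rw [Function.update_self, hjt, hvz, add_zero]

theorem shape_to_fill (l : List Int) (t : Int) (ht : 0 < t) (hnn : ∀ x ∈ l, 0 ≤ x) :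
    ∀ m : Nat, m < 2 ^ l.length →
    (∃ f, Distr4 (sel l m) f ∧ Shape t (sel l m).sum f) → 0 ≤ dpF l t m := by
  intro m
  induction m using Nat.strong_induction_on with
  | _ m IH =>
    rintro hmN ⟨f, hD, j, hoth, hj⟩
    by_cases hm0 : m = 0
    · subst hm0
      have hv : dpF l t 0 = 0 := by rw [dpF_unfold]; simp
      rw [hv]
    · have hne : sel l m ≠ [] := sel_ne_nil l m hm0 hmN
      have hmem : ∀ x ∈ sel l m, 0 ≤ x := fun x hx => hnn x ((sel_sublist l m).subset hx)
      have hr0 : 0 ≤ (sel l m).sum % t := Int.emod_nonneg _ (by omega)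
      have hrt : (sel l m).sum % t < t := Int.emod_lt_of_pos _ ht
      by_cases hrz : (sel l m).sum % t = 0
      · -- remainder 0 : every bucket is t or 0
        have hall : ∀ i, f i = t ∨ f i = 0 := by
          intro i
          by_cases hij : i = j
          · subst hij
            rcases hj with h | ⟨_, h⟩
            · right; rw [h, hrz]
            · left; exact h
          · exact hoth i hij
        by_cases hext : ∃ i, f i = t
        · obtain ⟨i₀, hi₀⟩ := hext
          obtain ⟨L₁, v, L₂, f', e, hD', hf⟩ :=
            distr4_extract hD i₀ (by rw [hi₀]; omega)
          obtain ⟨k, hk, hb, hv, e2⟩ := sel_pos l m L₁ L₂ v e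
          have h2k : 2 ^ k ≤ m := Nat.ge_two_pow_of_testBit hb
          have h2kp : 0 < 2 ^ k := Nat.two_pow_pos k
          have hmem' : ∀ x ∈ L₁ ++ L₂, 0 ≤ x := by
            intro x hx
            apply hmem x
            rw [e]
            simp only [List.mem_append, List.mem_cons] at hx ⊢
            tauto
          have hvpos : 0 ≤ v := hmem v (by rw [e]; simp)
          have hf'i : 0 ≤ f' i₀ := distr4_nonneg hD' hmem' i₀
          have hfv : f' i₀ + v = t := by
            rw [← hi₀, hf, Function.update_self]
          have hsum : (sel l m).sum = (sel l (m - 2 ^ k)).sum + l.getD k 0 :=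
            sel_sum_remove l m k hb hk
          have hr' : (sel l (m - 2 ^ k)).sum % t = (t - v) % t := by
            have he : (sel l (m - 2 ^ k)).sum = (sel l m).sum - v := by rw [hsum, hv]; ring
            obtain ⟨c, hc⟩ := Int.dvd_of_emod_eq_zero hrz
            rw [he, hc, show t * c - v = (t - v) + t * (c - 1) by ring,
              Int.add_mul_emod_self_left]
          have hshape' : Shape t (sel l (m - 2 ^ k)).sum f' := by
            refine ⟨i₀, ?_, ?_⟩
            · intro i hi
              have : f' i = f i := by rw [hf, Function.update_of_ne hi]
              rw [this]
              exact hall i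
            · by_cases hvz : v = 0
              · right
                refine ⟨by rw [hr', hvz]; simp, by omega⟩
              · left
                rw [hr', Int.emod_eq_of_lt (by omega) (by omega)]
                omega
          have hdp' := IH (m - 2 ^ k) (by omega) (by omega)
            ⟨f', by rw [e2]; exact hD', hshape'⟩
          apply (dpF_nonneg_iff l t ht m).mpr
          refine Or.inr ⟨k, hk, hb, hdp', ?_⟩
          rw [hr', hv]
          by_cases hvz : v = 0
          · rw [hvz]; simp; omega
          · rw [Int.emod_eq_of_lt (by omega) (by omega)]; omega
        · push_neg at hext
          have hall0 : ∀ i, f i = 0 := by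
            intro i
            rcases hall i with h | h
            · exact absurd h (hext i)
            · exact h
          have hsz : (sel l m).sum = 0 := by
            have hs := distr4_sum hD
            rw [hall0 0, hall0 1, hall0 2, hall0 3] at hs
            omega
          have hzl : ∀ x ∈ sel l m, x = 0 :=
            fun x hx => List.all_zero_of_le_zero_le_of_sum_eq_zero hmem hsz hx
          obtain ⟨w, L', e⟩ := List.exists_cons_of_ne_nil hne
          have hw : w = 0 := hzl w (by rw [e]; simp)
          obtain ⟨k, hk, hb, hv, e2⟩ := sel_pos l m [] L' w (by rw [e]; rfl)
          have h2k : 2 ^ k ≤ m := Nat.ge_two_pow_of_testBit hb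
          have h2kp : 0 < 2 ^ k := Nat.two_pow_pos k
          have hD2 : Distr4 L' f := by
            rw [e] at hD
            cases hD with
            | cons _ _ f₂ j₂ hd₂ =>
              have : Function.update f₂ j₂ (f₂ j₂ + w) = f₂ := by
                rw [hw, add_zero]
                exact Function.update_eq_self j₂ f₂
              rw [this]
              exact hd₂
          have hsum : (sel l m).sum = (sel l (m - 2 ^ k)).sum + l.getD k 0 :=
            sel_sum_remove l m k hb hk
          have hsz' : (sel l (m - 2 ^ k)).sum = 0 := by
            rw [hv] at hsum
            omega
          have hshape' : Shape t (sel l (m - 2 ^ k)).sum f :=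
            ⟨j, fun i _ => Or.inr (hall0 i), Or.inl (by rw [hsz', hall0 j]; simp)⟩
          have hdp' := IH (m - 2 ^ k) (by omega) (by omega)
            ⟨f, by rw [e2]; exact hD2, hshape'⟩
          apply (dpF_nonneg_iff l t ht m).mpr
          refine Or.inr ⟨k, hk, hb, hdp', ?_⟩
          rw [hsz', hv, hw]
          simp
          linarith
      · -- remainder nonzero : f j = r ≠ 0, extract from bucket j
        have hj1 : f j = (sel l m).sum % t := by
          rcases hj with h | ⟨h, _⟩
          · exact h
          · exact absurd h hrz
        obtain ⟨L₁, v, L₂, f', e, hD', hf⟩ :=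
          distr4_extract hD j (by rw [hj1]; exact hrz)
        obtain ⟨k, hk, hb, hv, e2⟩ := sel_pos l m L₁ L₂ v e
        have h2k : 2 ^ k ≤ m := Nat.ge_two_pow_of_testBit hb
        have h2kp : 0 < 2 ^ k := Nat.two_pow_pos k
        have hmem' : ∀ x ∈ L₁ ++ L₂, 0 ≤ x := by
          intro x hx
          apply hmem x
          rw [e]
          simp only [List.mem_append, List.mem_cons] at hx ⊢
          tauto
        have hvpos : 0 ≤ v := hmem v (by rw [e]; simp)
        have hf'j : 0 ≤ f' j := distr4_nonneg hD' hmem' j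
        have hfv : f' j + v = (sel l m).sum % t := by
          rw [← hj1, hf, Function.update_self]
        have hsum : (sel l m).sum = (sel l (m - 2 ^ k)).sum + l.getD k 0 :=
          sel_sum_remove l m k hb hk
        have hr' : (sel l (m - 2 ^ k)).sum % t = (sel l m).sum % t - v := by
          have he : (sel l (m - 2 ^ k)).sum = (sel l m).sum - v := by rw [hsum, hv]; ring
          have hvr : v ≤ (sel l m).sum % t := by linarith
          rw [he, Int.sub_emod,
            Int.emod_eq_of_lt (a := v) (b := t) (by linarith) (by linarith)]
          exact Int.emod_eq_of_lt (by linarith) (by linarith)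
        have hshape' : Shape t (sel l (m - 2 ^ k)).sum f' := by
          refine ⟨j, ?_, Or.inl ?_⟩
          · intro i hi
            have : f' i = f i := by rw [hf, Function.update_of_ne hi]
            rw [this]
            exact hoth i hi
          · rw [hr']
            omega
        have hdp' := IH (m - 2 ^ k) (by omega) (by omega)
          ⟨f', by rw [e2]; exact hD', hshape'⟩
        apply (dpF_nonneg_iff l t ht m).mpr
        refine Or.inr ⟨k, hk, hb, hdp', ?_⟩
        rw [hr', hv]
        omega

-- ---- A's port computes dpF ----


theorem shift_one (k : Nat) : (1 : Int) <<< k = ((2 ^ k : Nat) : Int) := by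
  simp [Int.shiftLeft_eq]

theorem band_not_two_pow (j k : Nat) :
    PySem.Int.band (↑j) (Int.not ((2 ^ k : Nat) : Int)) = ↑(j - (j &&& 2 ^ k)) := by
  have h1 : Int.not ((2 ^ k : Nat) : Int) = Int.negSucc (2 ^ k) := rfl
  rw [h1]
  simp only [PySem.Int.band]
  norm_num
  rw [show ((2 : ℤ) ^ k).toNat = 2 ^ k from by
    rw [← Nat.cast_ofNat (n := 2), ← Nat.cast_pow, Int.toNat_natCast]]

theorem set_map_range {α : Type} (f : Nat → α) (N j : Nat) (w : α) (hj : j < N) :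
    ((List.range N).map f).set j w = (List.range N).map (fun i => if i = j then w else f i) := by
  apply List.ext_getElem
  · simp
  · intro i h1 h2
    simp only [List.length_map, List.length_range] at h1
    simp only [List.getElem_set, List.getElem_map, List.getElem_range]
    by_cases hij : i = j
    · subst hij; simp
    · simp [hij, Ne.symm hij]

theorem dpF_zero (l : List Int) (t : Int) : dpF l t 0 = 0 := by
  rw [dpF_unfold]; simp

theorem aFind_eq (l : List Int) (t : Int) (j : Nat) (dp : List Int)
    (hjN : j < 2 ^ l.length)
    (hdp : dp = (List.range (2 ^ l.length)).map (fun i => if i < j then dpF l t i else -1)) :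
    aFind t dp (↑j) (PySem.List.enumerate l) = dpFind l t (dpF l t) j (List.range l.length) := by
  have henum : PySem.List.enumerate l
      = (List.range l.length).map (fun k : Nat => ((k : Int), l.getD k 0)) := by
    rw [PySem.List.enumerate_eq_map_pyRange l 0]
    simp [PySem.List.pyRange_zero_nat, List.map_map, Function.comp]
  rw [henum]
  suffices h : ∀ ks : List Nat, (∀ k ∈ ks, k < l.length) →
      aFind t dp (↑j) (ks.map fun k : Nat => ((k : Int), l.getD k 0)) = dpFind l t (dpF l t) j ks from
    h _ (fun k hk => List.mem_range.mp hk)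
  intro ks
  induction ks with
  | nil => intro _; rfl
  | cons k ks ih =>
    intro hks
    have hk : k < l.length := hks k (by simp)
    have ihr := ih (fun k' hk' => hks k' (by simp [hk']))
    simp only [List.map_cons, aFind, dpFind, Int.toNat_natCast, shift_one,
      PySem.Int.band_natCast]
    by_cases hb : j.testBit k
    · have hand : j &&& 2 ^ k = 2 ^ k := by rw [Nat.and_two_pow, hb]; simp
      have hcond : ((↑(j &&& 2 ^ k) : Int) == 0) = false := by
        simp [hand, pow_ne_zero]
      rw [hcond]
      simp only [Bool.false_eq_true, if_false, if_pos hb]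
      have h2k : 2 ^ k ≤ j := Nat.ge_two_pow_of_testBit hb
      have h2kp : 0 < 2 ^ k := Nat.two_pow_pos k
      have hs1 : PySem.Int.band (↑j) (Int.not ((2 ^ k : Nat) : Int)) = ((j - 2 ^ k : Nat) : Int) := by
        rw [band_not_two_pow, hand]
      rw [hs1]
      have hd1 : PySem.List.pyGetD dp ((j - 2 ^ k : Nat) : Int) (-1) = dpF l t (j - 2 ^ k) := by
        rw [hdp, PySem.List.pyGetD_natCast, PySem.List.getD_map_range _ _ _ _ (by omega)]
        rw [if_pos (by omega)]
      rw [hd1]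
      by_cases hc : 0 ≤ dpF l t (j - 2 ^ k) ∧ dpF l t (j - 2 ^ k) + l.getD k 0 ≤ t
      · rw [if_pos hc, if_pos hc]
      · rw [if_neg hc, if_neg hc]
        exact ihr
    · have hand : j &&& 2 ^ k = 0 := by rw [Nat.and_two_pow]; simp [hb]
      have hcond : ((↑(j &&& 2 ^ k) : Int) == 0) = true := by simp [hand]
      rw [hcond]
      simp only [if_true, hb, Bool.false_eq_true, if_false]
      exact ihr

theorem makesquare_eq_dpF (l : List Int) (t : Int) (ht : 0 < t)
    (hmod : PySem.Int.mod l.sum 4 = 0) (htdef : t = PySem.Int.floordiv l.sum 4) :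
    makesquare l = (dpF l t (2 ^ l.length - 1) == 0) := by
  have hN : 0 < 2 ^ l.length := Nat.two_pow_pos _
  have hdp0 : PySem.List.pySetD (PySem.List.pyRepeat [(-1 : Int)] ((1 : Int) <<< l.length)) 0 0
      = (List.range (2 ^ l.length)).map (fun i => if i < 1 then dpF l t i else -1) := by
    rw [shift_one, PySem.List.pyRepeat_singleton, Int.toNat_natCast,
      PySem.List.pySetD_of_nonneg _ _ (by norm_num)]
    apply List.ext_getElem
    · simp
    · intro i h1 h2
      simp only [List.length_set, List.length_replicate] at h1
      simp only [List.getElem_set, List.getElem_replicate, List.getElem_map, List.getElem_range]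
      by_cases hi : i = 0
      · subst hi
        simp [dpF_zero]
      · simp [show ¬ i < 1 by omega]
        omega
  have hfold : ∀ j : Nat, 1 ≤ j → j ≤ 2 ^ l.length →
      (PySem.List.pyRange 1 (↑j)).foldl
        (fun dp s =>
          match aFind t dp s (PySem.List.enumerate l) with
          | some w => PySem.List.pySetD dp s w
          | none => dp)
        ((List.range (2 ^ l.length)).map (fun i => if i < 1 then dpF l t i else -1))
      = (List.range (2 ^ l.length)).map (fun i => if i < j then dpF l t i else -1) := by
    intro j
    induction j with
    | zero => omega
    | succ j ihj =>
      intro _ hle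
      by_cases hj1 : j = 0
      · subst hj1
        rw [show ((1 : Nat) : Int) = 1 by norm_num, PySem.List.pyRange_one_eq_nil (by norm_num)]
        rfl
      · have hjN : j < 2 ^ l.length := by omega
        have hprev := ihj (by omega) (by omega)
        rw [show ((j + 1 : Nat) : Int) = (j : Int) + 1 by push_cast; ring,
          PySem.List.pyRange_one_succ_right (by exact_mod_cast Nat.one_le_iff_ne_zero.mpr hj1),
          List.foldl_append, hprev]
        simp only [List.foldl_cons, List.foldl_nil]
        rw [aFind_eq l t j _ hjN rfl]
        cases hF : dpFind l t (dpF l t) j (List.range l.length) with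
        | none =>
          have hdpFj : dpF l t j = -1 := by rw [dpF_unfold]; simp [hj1, hF]
          show List.map (fun i => if i < j then dpF l t i else -1) (List.range (2 ^ l.length))
            = List.map (fun i => if i < j + 1 then dpF l t i else -1) (List.range (2 ^ l.length))
          apply List.map_congr_left
          intro i hi
          by_cases hij : i = j
          · subst hij
            rw [if_neg (by omega), if_pos (by omega), hdpFj]
          · by_cases hlt : i < j
            · rw [if_pos hlt, if_pos (by omega)]
            · rw [if_neg hlt, if_neg (by omega)]
        | some w =>
          have hdpFj : dpF l t j = w := by rw [dpF_unfold]; simp [hj1, hF]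
          show PySem.List.pySetD _ ((j : Int)) w = _
          rw [PySem.List.pySetD_natCast, set_map_range _ _ _ _ hjN]
          apply List.map_congr_left
          intro i hi
          have hiN : i < 2 ^ l.length := List.mem_range.mp hi
          by_cases hij : i = j
          · subst hij
            simp [hdpFj]
          · simp only [hij, if_false]
            by_cases hlt : i < j
            · rw [if_pos hlt, if_pos (by omega)]
            · rw [if_neg hlt, if_neg (by omega)]
  simp only [makesquare]
  rw [if_neg (fun hc => hc hmod)]
  rw [hdp0]
  have hlen : PySem.List.len ((List.range (2 ^ l.length)).map (fun i => if i < 1 then dpF l t i else -1)) = ((2 ^ l.length : Nat) : Int) := by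
    simp [PySem.List.len_eq]
  rw [hlen, ← htdef]
  rw [hfold (2 ^ l.length) (by omega) (le_refl _)]
  have hfinal : (List.range (2 ^ l.length)).map (fun i => if i < 2 ^ l.length then dpF l t i else -1)
      = (List.range (2 ^ l.length)).map (dpF l t) := by
    apply List.map_congr_left
    intro i hi
    rw [if_pos (List.mem_range.mp hi)]
  rw [hfinal]
  have hne : (List.range (2 ^ l.length)).map (dpF l t) ≠ [] := by
    simp [List.map_eq_nil_iff, List.range_eq_nil]
  rw [PySem.List.pyGetD_neg_one _ _ hne]
  rw [List.getLast_eq_getElem]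
  simp [List.getElem_map, List.getElem_range]


theorem upd_apply (f : Fin 4 → Int) (j i : Fin 4) (w : Int) :
    Function.update f j w i = if i = j then w else f i := by
  by_cases h : i = j
  · subst h; simp
  · simp [Function.update_of_ne h, h]

-- ---- B's port decides the bucket predicate ----

theorem bDfs_iff (t : Int) : ∀ (L : List Int) (a b c d : Int), (∀ x ∈ L, 0 ≤ x) →
    a ≤ t → b ≤ t → c ≤ t → d ≤ t →
    (bDfs t L a b c d = true ↔ ∃ f, Distr4 L f ∧
      a + f 0 ≤ t ∧ b + f 1 ≤ t ∧ c + f 2 ≤ t ∧ d + f 3 ≤ t) := by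
  intro L
  induction L with
  | nil =>
    intro a b c d _ ha hb hc hd
    simp only [bDfs]
    constructor
    · intro _
      exact ⟨fun _ => 0, Distr4.nil, by simpa, by simpa, by simpa, by simpa⟩
    · intro _; trivial
  | cons v rest ih =>
    intro a b c d hnn ha hb hc hd
    have hv : 0 ≤ v := hnn v (by simp)
    have hnr : ∀ x ∈ rest, 0 ≤ x := fun x hx => hnn x (by simp [hx])
    constructor
    · intro h
      simp only [bDfs, Bool.or_eq_true, Bool.and_eq_true, decide_eq_true_eq] at h
      rcases h with ((⟨hle, hrec⟩ | ⟨hle, hrec⟩) | ⟨hle, hrec⟩) | ⟨hle, hrec⟩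
      · obtain ⟨f, hD, h0, h1, h2, h3⟩ := (ih (a + v) b c d hnr (by linarith) hb hc hd).mp hrec
        refine ⟨Function.update f 0 (f 0 + v), Distr4.cons v rest f 0 hD, ?_, ?_, ?_, ?_⟩ <;>
          simp only [upd_apply] <;> simp <;> linarith
      · obtain ⟨f, hD, h0, h1, h2, h3⟩ := (ih a (b + v) c d hnr ha (by linarith) hc hd).mp hrec
        refine ⟨Function.update f 1 (f 1 + v), Distr4.cons v rest f 1 hD, ?_, ?_, ?_, ?_⟩ <;>
          simp only [upd_apply] <;> simp <;> linarith
      · obtain ⟨f, hD, h0, h1, h2, h3⟩ := (ih a b (c + v) d hnr ha hb (by linarith) hd).mp hrec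
        refine ⟨Function.update f 2 (f 2 + v), Distr4.cons v rest f 2 hD, ?_, ?_, ?_, ?_⟩ <;>
          simp only [upd_apply] <;> simp <;> linarith
      · obtain ⟨f, hD, h0, h1, h2, h3⟩ := (ih a b c (d + v) hnr ha hb hc (by linarith)).mp hrec
        refine ⟨Function.update f 3 (f 3 + v), Distr4.cons v rest f 3 hD, ?_, ?_, ?_, ?_⟩ <;>
          simp only [upd_apply] <;> simp <;> linarith
    · rintro ⟨g, hD, h0, h1, h2, h3⟩
      cases hD with
      | cons _ _ f j hdist =>
        have hnn4 := distr4_nonneg hdist hnr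
        simp only [bDfs, Bool.or_eq_true, Bool.and_eq_true, decide_eq_true_eq]
        simp only [upd_apply] at h0 h1 h2 h3
        fin_cases j
        · left; left; left
          have hg0 := h0; have hg1 := h1; have hg2 := h2; have hg3 := h3
          simp at hg0 hg1 hg2 hg3
          have hf := hnn4 0
          refine ⟨by linarith, ?_⟩
          apply (ih (a + v) b c d hnr (by linarith) hb hc hd).mpr
          exact ⟨f, hdist, by linarith, by linarith, by linarith, by linarith⟩
        · left; left; right
          have hg0 := h0; have hg1 := h1; have hg2 := h2; have hg3 := h3
          simp at hg0 hg1 hg2 hg3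
          have hf := hnn4 1
          refine ⟨by linarith, ?_⟩
          apply (ih a (b + v) c d hnr ha (by linarith) hc hd).mpr
          exact ⟨f, hdist, by linarith, by linarith, by linarith, by linarith⟩
        · left; right
          have hg0 := h0; have hg1 := h1; have hg2 := h2; have hg3 := h3
          simp at hg0 hg1 hg2 hg3
          have hf := hnn4 2
          refine ⟨by linarith, ?_⟩
          apply (ih a b (c + v) d hnr ha hb (by linarith) hd).mpr
          exact ⟨f, hdist, by linarith, by linarith, by linarith, by linarith⟩
        · right
          have hg0 := h0; have hg1 := h1; have hg2 := h2; have hg3 := h3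
          simp at hg0 hg1 hg2 hg3
          have hf := hnn4 3
          refine ⟨by linarith, ?_⟩
          apply (ih a b c (d + v) hnr ha hb hc (by linarith)).mpr
          exact ⟨f, hdist, by linarith, by linarith, by linarith, by linarith⟩


theorem bool_eq_of_iff {a b : Bool} (h : a = true ↔ b = true) : a = b := by
  cases a <;> cases b <;> simp_all

-- ===== VERDICT (by name: the statement is the Claim_ definition above) =====
theorem makesquare_spec : Claim_equal_makesquare := by
  intro l _ hpre
  unfold Spec_makesquare
  by_cases hmod : PySem.Int.mod l.sum 4 = 0
  · have hpre' : (∀ x ∈ l, 0 ≤ x) ∧ (l = [] ∨ l.sum ≠ 0) :=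
      hpre.resolve_right (fun h => h hmod)
    by_cases hnil : l = []
    · subst hnil; decide
    · have hnn := hpre'.1
      have hs0 : l.sum ≠ 0 := hpre'.2.resolve_left hnil
      have hspos : 0 < l.sum := lt_of_le_of_ne (List.sum_nonneg hnn) (Ne.symm hs0)
      obtain ⟨c, hc⟩ := (PySem.Int.mod_eq_zero_iff_dvd l.sum 4).mp hmod
      have htval : PySem.Int.floordiv l.sum 4 = c := by
        rw [PySem.Int.floordiv_eq_ediv_of_pos (by norm_num), hc,
          Int.mul_ediv_cancel_left _ (by norm_num)]
      have ht : 0 < PySem.Int.floordiv l.sum 4 := by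
        rw [htval]
        have h4c : 0 < 4 * c := hc ▸ hspos
        omega
      have hsum4 : l.sum = 4 * PySem.Int.floordiv l.sum 4 := by rw [htval, hc]
      have hz : l.sum % PySem.Int.floordiv l.sum 4 = 0 := by
        rw [htval, hc]
        exact Int.mul_emod_left 4 c
      have hA := makesquare_eq_dpF l (PySem.Int.floordiv l.sum 4) ht hmod rfl
      have hsorted : (PySem.List.sorted l (fun x => x) true).Perm l :=
        PySem.List.sorted_perm l _ true
      have hnns : ∀ x ∈ PySem.List.sorted l (fun x => x) true, 0 ≤ x :=
        fun x hx => hnn x (hsorted.mem_iff.mp hx)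
      have hB : makesquare_alt l
          = bDfs (PySem.Int.floordiv l.sum 4) (PySem.List.sorted l (fun x => x) true) 0 0 0 0 := by
        simp only [makesquare_alt]
        rw [if_neg (fun hc' => hc' hmod)]
      have hBiff := bDfs_iff (PySem.Int.floordiv l.sum 4)
        (PySem.List.sorted l (fun x => x) true) 0 0 0 0 hnns
        (le_of_lt ht) (le_of_lt ht) (le_of_lt ht) (le_of_lt ht)
      have hfullsel : sel l (2 ^ l.length - 1) = l := sel_full l
      have hAiff : makesquare l = true ↔
          ∃ f, Distr4 l f ∧ Shape (PySem.Int.floordiv l.sum 4) l.sum f := by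
        rw [hA, beq_iff_eq]
        constructor
        · intro h0
          have hge : 0 ≤ dpF l (PySem.Int.floordiv l.sum 4) (2 ^ l.length - 1) := by
            rw [h0]
          obtain ⟨f, hD, hS⟩ :=
            fill_to_shape l (PySem.Int.floordiv l.sum 4) ht hnn (le_of_eq hsum4) _ hge
          rw [hfullsel] at hD hS
          exact ⟨f, hD, hS⟩
        · rintro ⟨f, hD, hS⟩
          have hge : 0 ≤ dpF l (PySem.Int.floordiv l.sum 4) (2 ^ l.length - 1) :=
            shape_to_fill l (PySem.Int.floordiv l.sum 4) ht hnn _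
              (by have := Nat.two_pow_pos l.length; omega)
              ⟨f, by rw [hfullsel]; exact hD, by rw [hfullsel]; exact hS⟩
          rcases dpF_neg_or l (PySem.Int.floordiv l.sum 4) ht (2 ^ l.length - 1) with h | h
          · rw [h] at hge; omega
          · rw [h, hfullsel, hz]
      have hBridge : (∃ f, Distr4 l f ∧ Shape (PySem.Int.floordiv l.sum 4) l.sum f) ↔
          (∃ f, Distr4 l f ∧ 0 + f 0 ≤ PySem.Int.floordiv l.sum 4 ∧
            0 + f 1 ≤ PySem.Int.floordiv l.sum 4 ∧ 0 + f 2 ≤ PySem.Int.floordiv l.sum 4 ∧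
            0 + f 3 ≤ PySem.Int.floordiv l.sum 4) := by
        constructor
        · rintro ⟨f, hD, j, hoth, hj⟩
          have hall : ∀ i, f i ≤ PySem.Int.floordiv l.sum 4 := by
            intro i
            by_cases hij : i = j
            · subst hij
              rcases hj with h | ⟨_, h⟩
              · rw [h, hz]; linarith
              · rw [h]
            · rcases hoth i hij with h | h <;> rw [h] <;> linarith
          exact ⟨f, hD, by linarith [hall 0], by linarith [hall 1],
            by linarith [hall 2], by linarith [hall 3]⟩
        · rintro ⟨f, hD, h0, h1, h2, h3⟩
          have hsf := distr4_sum hD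
          rw [hsum4] at hsf
          have hf0 : f 0 = PySem.Int.floordiv l.sum 4 := by linarith
          have hf1 : f 1 = PySem.Int.floordiv l.sum 4 := by linarith
          have hf2 : f 2 = PySem.Int.floordiv l.sum 4 := by linarith
          have hf3 : f 3 = PySem.Int.floordiv l.sum 4 := by linarith
          refine ⟨f, hD, 0, ?_, Or.inr ⟨hz, hf0⟩⟩
          intro i hi
          fin_cases i
          · exact absurd rfl hi
          · exact Or.inl hf1
          · exact Or.inl hf2
          · exact Or.inl hf3
      have hBiff2 : (∃ f, Distr4 (PySem.List.sorted l (fun x => x) true) f ∧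
            0 + f 0 ≤ PySem.Int.floordiv l.sum 4 ∧ 0 + f 1 ≤ PySem.Int.floordiv l.sum 4 ∧
            0 + f 2 ≤ PySem.Int.floordiv l.sum 4 ∧ 0 + f 3 ≤ PySem.Int.floordiv l.sum 4) ↔
          (∃ f, Distr4 l f ∧
            0 + f 0 ≤ PySem.Int.floordiv l.sum 4 ∧ 0 + f 1 ≤ PySem.Int.floordiv l.sum 4 ∧
            0 + f 2 ≤ PySem.Int.floordiv l.sum 4 ∧ 0 + f 3 ≤ PySem.Int.floordiv l.sum 4) :=
        exists_congr (fun f =>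
          and_congr_left' ⟨distr4_perm hsorted, distr4_perm hsorted.symm⟩)
      rw [hB]
      exact bool_eq_of_iff (hAiff.trans (hBridge.trans (hBiff2.symm.trans hBiff.symm)))
  · simp only [makesquare, makesquare_alt]
    rw [if_pos hmod, if_pos hmod]
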